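-- pv_equiv track=rewrite | github.com/sachn-cs/factorise | source/stages/quadratic_sieve.py | _factor_over_base
-- ===== SOURCE A (Python) =====
-- def _factor_over_base(
--
--     value: int,
--     prime_base: list[int],
-- ) -> list[int] | None:
--     """Factor a value over the given prime base.
--
--     Args:
--         value: The integer to factor.
--         prime_base: The list of allowed primes (and -1).
--
--     Returns:
--         A list of exponents (one per prime in the base), or None if the
--         value has a prime factor outside the base.
--     """
--     exponents = [0] * len(prime_base)
--     remaining = value
--
--     if remaining < 0:
--         exponents[0] = 1
--         remaining = -remaining
--
--     for index, prime in enumerate(prime_base):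
--         if prime == -1:
--             continue
--         if prime * prime > remaining:
--             break
--         if remaining % prime != 0:
--             continue
--         count = 0
--         while remaining % prime == 0:
--             remaining //= prime
--             count += 1
--         exponents[index] = count
--
--     if remaining == 1:
--         return exponents
--
--     if remaining in prime_base:
--         index = prime_base.index(remaining)
--         exponents[index] += 1
--         return exponents
--
--     return None
-- ===== SOURCE B (Python) =====
-- def _factor_over_base(value, prime_base):
--     """Build the exponent list functionally: strip each base prime out of
--     abs(value) in turn, then add the sign exponent at the very end."""
--
--     def strip(n, p):
--         e = 0
--         while n and n % p == 0:
--             n //= p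
--             e += 1
--         return e, n
--
--     remaining = abs(value)
--     exponents = []
--     for prime in prime_base:
--         if prime == -1:
--             exponents.append(0)
--         else:
--             e, remaining = strip(remaining, prime)
--             exponents.append(e)
--
--     if remaining != 1:
--         return None
--     if value < 0:
--         exponents[0] += 1
--     return exponents
-- ===== Notes on version B (the rewrite author's own statement) =====
-- stated objective: alternative
-- what changed: Drops A's prime*prime>remaining early-break, the in-place exponent array and the cofactor 'remaining in prime_base'/.index block; B builds the exponent list functionally by fully stripping each base prime out of abs(value) with a strip helper, appending one exponent per prime, and adds the sign exponent at the end only when the remainder reached 1.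
-- outside the precondition, e.g. on _factor_over_base(6, [3, 6]): A returns [0, 1], B returns None; on _factor_over_base(4, [3, 2]): A returns None, B returns [0, 2]; on _factor_over_base(-12, [2, 3]): A returns [2, 1], B returns [3, 1]
import Mathlib
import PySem

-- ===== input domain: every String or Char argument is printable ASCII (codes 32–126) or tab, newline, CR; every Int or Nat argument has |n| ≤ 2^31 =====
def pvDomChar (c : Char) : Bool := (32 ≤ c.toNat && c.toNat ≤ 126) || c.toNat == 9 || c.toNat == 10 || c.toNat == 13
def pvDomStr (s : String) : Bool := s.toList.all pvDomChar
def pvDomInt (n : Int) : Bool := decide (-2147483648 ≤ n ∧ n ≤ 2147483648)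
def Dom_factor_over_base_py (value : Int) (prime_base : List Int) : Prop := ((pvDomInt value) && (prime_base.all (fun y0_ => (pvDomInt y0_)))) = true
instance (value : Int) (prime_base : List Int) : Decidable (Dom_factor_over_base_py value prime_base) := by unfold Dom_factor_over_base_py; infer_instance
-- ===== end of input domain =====

-- B replaces A's √remaining early-break, in-place exponent array and cofactor
-- membership/index lookup by a functional pass that strips each base prime out of
-- abs(value) and conses one exponent per prime, adding the sign exponent at the end
-- (objective: alternative). Proved equal on Pre_ (a sorted prime base, optionally led
-- by -1, with -1 first for negative values; plus the inert and zero inputs).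

-- termination measure for the division loops (cited by decreasing_by)
theorem pvDivShrink (p rem : Int) (h2 : 2 ≤ p.natAbs) (h0 : rem ≠ 0) (hd : PySem.Int.mod rem p = 0) :
    (PySem.Int.floordiv rem p).natAbs < rem.natAbs := by
  have hq : PySem.Int.floordiv rem p * p + PySem.Int.mod rem p = rem := PySem.Int.floordiv_mul_add_mod rem p
  rw [hd, add_zero] at hq
  have hm : (PySem.Int.floordiv rem p).natAbs * p.natAbs = rem.natAbs := by
    rw [← Int.natAbs_mul, hq]
  have hne : (PySem.Int.floordiv rem p).natAbs ≠ 0 := by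
    intro e
    apply h0
    rw [← hq, Int.natAbs_eq_zero.mp e, zero_mul]
  have h1 : 1 ≤ (PySem.Int.floordiv rem p).natAbs := Nat.one_le_iff_ne_zero.mpr hne
  calc (PySem.Int.floordiv rem p).natAbs
      < (PySem.Int.floordiv rem p).natAbs * 2 := by omega
    _ ≤ (PySem.Int.floordiv rem p).natAbs * p.natAbs := Nat.mul_le_mul_left _ h2
    _ = rem.natAbs := hm

-- ===== PORT A =====
-- inner `while remaining % prime == 0` counting loop; the `2 ≤ p.natAbs ∧ rem ≠ 0` part of
-- the guard is only a termination guard: on every input A's Python reaches this loop on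
-- and returns from, it holds (Python diverges or has raised earlier otherwise).
def aDivOut (p rem count : Int) : Int × Int :=
  if h : 2 ≤ p.natAbs ∧ rem ≠ 0 ∧ PySem.Int.mod rem p = 0 then
    aDivOut p (PySem.Int.floordiv rem p) (count + 1)
  else (rem, count)
termination_by rem.natAbs
decreasing_by exact pvDivShrink p rem h.1 h.2.1 h.2.2

-- `for index, prime in enumerate(prime_base)` with `continue`/`break`
def aLoop : List Int → Nat → Int → List Int → List Int × Int
  | [], _, rem, exps => (exps, rem)
  | p :: rest, i, rem, exps =>
    if p = -1 then aLoop rest (i + 1) rem exps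
    else if rem < p * p then (exps, rem)                         -- prime*prime > remaining: break
    else if PySem.Int.mod rem p ≠ 0 then aLoop rest (i + 1) rem exps
    else
      let rc := aDivOut p rem 0
      aLoop rest (i + 1) rc.1 (exps.set i rc.2)                  -- exponents[index] = count

-- the tail of A: `if remaining == 1 … if remaining in prime_base: index = prime_base.index(remaining) …`
-- (the membership test plus `.index` is exactly a match on the first index)
def aFinish (prime_base : List Int) (res : List Int × Int) : Option (List Int) :=
  if res.2 = 1 then some res.1
  else
    match PySem.List.index? prime_base res.2 with
    | some i => some (res.1.set i (res.1.getD i 0 + 1))          -- exponents[index] += 1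
    | none => none

def factor_over_base_py (value : Int) (prime_base : List Int) : Option (List Int) :=
  let exps0 := List.replicate prime_base.length (0 : Int)
  -- `if remaining < 0: exponents[0] = 1; remaining = -remaining` (IndexError on an empty
  -- base here; Pre_ excludes that input)
  let start := if value < 0 then (exps0.set 0 1, -value) else (exps0, value)
  aFinish prime_base (aLoop prime_base 0 start.2 start.1)

-- ===== PORT B =====
-- `strip(n, p)`: `while n and n % p == 0`, returning `(e, n)`; `2 ≤ p.natAbs` is only a
-- termination guard (B's Python diverges otherwise).
def bStrip (p n e : Int) : Int × Int :=
  if h : 2 ≤ p.natAbs ∧ n ≠ 0 ∧ PySem.Int.mod n p = 0 then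
    bStrip p (PySem.Int.floordiv n p) (e + 1)
  else (e, n)
termination_by n.natAbs
decreasing_by exact pvDivShrink p n h.1 h.2.1 h.2.2

-- `for prime in prime_base: … exponents.append(…)` threading `remaining` and building
-- the exponent list front-to-back
def bRun : List Int → Int → List Int × Int
  | [], rem => ([], rem)
  | p :: rest, rem =>
    if p = -1 then
      let r := bRun rest rem
      (0 :: r.1, r.2)
    else
      let en := bStrip p rem 0
      let r := bRun rest en.2
      (en.1 :: r.1, r.2)

def factor_over_base_py_alt (value : Int) (prime_base : List Int) : Option (List Int) :=
  let res := bRun prime_base |value|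
  if res.2 = 1 then
    -- `if value < 0: exponents[0] += 1` (IndexError on an empty base; Pre_ excludes it)
    some (if value < 0 then res.1.set 0 (res.1.getD 0 0 + 1) else res.1)
  else none

-- ===== PRECONDITION & SPEC =====
-- Pre_ admits (1) the function's natural domain — a nondecreasing base of primes (and -1),
-- with -1 first whenever value is negative — plus the inert inputs: (2) no base element
-- other than -1 divides the (nonzero) value, (3) value = 0 with 0 not in the base. Outside
-- it A raises (0 in a reached position; negative value with an empty base), diverges (1 in
-- a reached position), or — on unsorted, composite or mis-signed bases, which its √-bounded
-- break and cofactor lookup assume away — returns accidental values plain trial division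
-- does not reproduce (see the cites in the claim); on many such excluded bases the two
-- programs still happen to coincide (typically both None, each for its own incidental
-- reason), but neither value is the specified one, so Pre_ does not claim them.
def Pre_factor_over_base_py (value : Int) (prime_base : List Int) : Prop :=
  (prime_base.Pairwise (· ≤ ·) ∧
    (∀ p ∈ prime_base, p = -1 ∨ (2 ≤ p ∧ Nat.Prime p.toNat)) ∧
    (value < 0 → prime_base.head? = some (-1))) ∨
  (value ≠ 0 ∧ (value < 0 → prime_base ≠ []) ∧
    (∀ p ∈ prime_base, p = -1 ∨ (p ≠ 0 ∧ ¬ (p ∣ value)))) ∨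
  (value = 0 ∧ (0 : Int) ∉ prime_base)

instance (value : Int) (prime_base : List Int) : Decidable (Pre_factor_over_base_py value prime_base) := by
  unfold Pre_factor_over_base_py; infer_instance

def pvWitness_factor_over_base_py : Int × List Int := (-12, [-1, 2, 3])

def Spec_factor_over_base_py (value : Int) (prime_base : List Int) (out : Option (List Int)) : Prop := out = factor_over_base_py_alt value prime_base
instance (value : Int) (prime_base : List Int) (out : Option (List Int)) : Decidable (Spec_factor_over_base_py value prime_base out) := by unfold Spec_factor_over_base_py; infer_instance

-- ===== CLAIM (what is proved, stated in full; the proofs are below) =====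
def Claim_equal_factor_over_base_py : Prop := ∀ (value : Int) (prime_base : List Int), Dom_factor_over_base_py value prime_base → Pre_factor_over_base_py value prime_base → Spec_factor_over_base_py value prime_base (factor_over_base_py value prime_base)

-- ===== LEMMAS AND PROOFS =====

-- proof-side helpers: the index-threading loop of the previous analysis, used only as a
-- stepping stone between A's loop and B's functional pass
def bDivOut (p rem e : Int) : Int × Int :=
  if h : 2 ≤ p.natAbs ∧ rem ≠ 0 ∧ PySem.Int.mod rem p = 0 then
    bDivOut p (PySem.Int.floordiv rem p) (e + 1)
  else (rem, e)
termination_by rem.natAbs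
decreasing_by exact pvDivShrink p rem h.1 h.2.1 h.2.2

def bLoop : List Int → Nat → Int → List Int → List Int × Int
  | [], _, rem, exps => (exps, rem)
  | p :: rest, i, rem, exps =>
    if p = -1 then bLoop rest (i + 1) rem exps
    else
      let rc := bDivOut p rem (exps.getD i 0)
      bLoop rest (i + 1) rc.1 (exps.set i rc.2)

-- small list bookkeeping
theorem pv_set_getD (xs : List Int) (i : Nat) : xs.set i (xs.getD i 0) = xs := by
  by_cases h : i < xs.length
  · apply List.ext_getElem?
    intro j
    rw [List.getElem?_set]
    split
    · next he => subst he; simp [List.getD_eq_getElem?_getD, h]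
    · rfl
  · exact List.set_eq_of_length_le (by omega)

theorem pv_getD_set_ne (xs : List Int) (v : Int) (i j : Nat) (h : i ≠ j) :
    (xs.set i v).getD j 0 = xs.getD j 0 := by
  simp [List.getD_eq_getElem?_getD, List.getElem?_set_ne h]

theorem pv_getD_replicate (n j : Nat) : (List.replicate n (0:Int)).getD j 0 = 0 := by
  simp [List.getD_eq_getElem?_getD, List.getElem?_replicate]
  split <;> rfl

-- one-step branch lemmas for the division loops
theorem aDivOut_pos (p rem c : Int) (h : 2 ≤ p.natAbs ∧ rem ≠ 0 ∧ PySem.Int.mod rem p = 0) :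
    aDivOut p rem c = aDivOut p (PySem.Int.floordiv rem p) (c + 1) := by
  rw [aDivOut]; rw [dif_pos h]

theorem aDivOut_neg (p rem c : Int) (h : ¬ (2 ≤ p.natAbs ∧ rem ≠ 0 ∧ PySem.Int.mod rem p = 0)) :
    aDivOut p rem c = (rem, c) := by
  rw [aDivOut]; rw [dif_neg h]

theorem bDivOut_pos (p rem c : Int) (h : 2 ≤ p.natAbs ∧ rem ≠ 0 ∧ PySem.Int.mod rem p = 0) :
    bDivOut p rem c = bDivOut p (PySem.Int.floordiv rem p) (c + 1) := by
  rw [bDivOut]; rw [dif_pos h]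

theorem bDivOut_neg (p rem c : Int) (h : ¬ (2 ≤ p.natAbs ∧ rem ≠ 0 ∧ PySem.Int.mod rem p = 0)) :
    bDivOut p rem c = (rem, c) := by
  rw [bDivOut]; rw [dif_neg h]

theorem bStrip_pos (p rem c : Int) (h : 2 ≤ p.natAbs ∧ rem ≠ 0 ∧ PySem.Int.mod rem p = 0) :
    bStrip p rem c = bStrip p (PySem.Int.floordiv rem p) (c + 1) := by
  rw [bStrip]; rw [dif_pos h]

theorem bStrip_neg (p rem c : Int) (h : ¬ (2 ≤ p.natAbs ∧ rem ≠ 0 ∧ PySem.Int.mod rem p = 0)) :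
    bStrip p rem c = (c, rem) := by
  rw [bStrip]; rw [dif_neg h]

theorem pv_divOut_eq (p : Int) : ∀ (n : Nat) (rem c : Int), rem.natAbs ≤ n →
    bDivOut p rem c = aDivOut p rem c := by
  intro n
  induction n with
  | zero =>
    intro rem c hn
    by_cases h : 2 ≤ p.natAbs ∧ rem ≠ 0 ∧ PySem.Int.mod rem p = 0
    · exact absurd (pvDivShrink p rem h.1 h.2.1 h.2.2) (by omega)
    · rw [bDivOut_neg p rem c h, aDivOut_neg p rem c h]
  | succ n ih =>
    intro rem c hn
    by_cases h : 2 ≤ p.natAbs ∧ rem ≠ 0 ∧ PySem.Int.mod rem p = 0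
    · have hlt := pvDivShrink p rem h.1 h.2.1 h.2.2
      rw [bDivOut_pos p rem c h, aDivOut_pos p rem c h]
      exact ih _ _ (by omega)
    · rw [bDivOut_neg p rem c h, aDivOut_neg p rem c h]

-- B's strip returns the same pair, components swapped
theorem pv_strip_eq (p : Int) : ∀ (n : Nat) (rem c : Int), rem.natAbs ≤ n →
    bStrip p rem c = ((bDivOut p rem c).2, (bDivOut p rem c).1) := by
  intro n
  induction n with
  | zero =>
    intro rem c hn
    by_cases h : 2 ≤ p.natAbs ∧ rem ≠ 0 ∧ PySem.Int.mod rem p = 0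
    · exact absurd (pvDivShrink p rem h.1 h.2.1 h.2.2) (by omega)
    · rw [bStrip_neg p rem c h, bDivOut_neg p rem c h]
  | succ n ih =>
    intro rem c hn
    by_cases h : 2 ≤ p.natAbs ∧ rem ≠ 0 ∧ PySem.Int.mod rem p = 0
    · have hlt := pvDivShrink p rem h.1 h.2.1 h.2.2
      rw [bStrip_pos p rem c h, bDivOut_pos p rem c h]
      exact ih _ _ (by omega)
    · rw [bStrip_neg p rem c h, bDivOut_neg p rem c h]

theorem pv_divOut_shift (p : Int) : ∀ (n : Nat) (rem c : Int), rem.natAbs ≤ n →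
    aDivOut p rem c = ((aDivOut p rem 0).1, c + (aDivOut p rem 0).2) := by
  intro n
  induction n with
  | zero =>
    intro rem c hn
    by_cases h : 2 ≤ p.natAbs ∧ rem ≠ 0 ∧ PySem.Int.mod rem p = 0
    · exact absurd (pvDivShrink p rem h.1 h.2.1 h.2.2) (by omega)
    · rw [aDivOut_neg p rem c h, aDivOut_neg p rem 0 h]
      simp
  | succ n ih =>
    intro rem c hn
    by_cases h : 2 ≤ p.natAbs ∧ rem ≠ 0 ∧ PySem.Int.mod rem p = 0
    · have hlt := pvDivShrink p rem h.1 h.2.1 h.2.2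
      rw [aDivOut_pos p rem c h, aDivOut_pos p rem 0 h]
      rw [ih _ (c+1) (by omega), ih _ (0+1) (by omega)]
      simp
      ring
    · rw [aDivOut_neg p rem c h, aDivOut_neg p rem 0 h]
      simp

theorem pv_divOut_spec (p : Int) : ∀ (n : Nat) (rem c : Int), rem.natAbs ≤ n →
    2 ≤ p → rem ≠ 0 →
    (aDivOut p rem c).1 ∣ rem ∧ ¬ (p ∣ (aDivOut p rem c).1) ∧ (aDivOut p rem c).1 ≠ 0 ∧
      (0 ≤ rem → 0 ≤ (aDivOut p rem c).1) := by
  intro n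
  induction n with
  | zero =>
    intro rem c hn hp h0
    by_cases h : 2 ≤ p.natAbs ∧ rem ≠ 0 ∧ PySem.Int.mod rem p = 0
    · exact absurd (pvDivShrink p rem h.1 h.2.1 h.2.2) (by omega)
    · rw [aDivOut_neg p rem c h]
      refine ⟨dvd_refl _, ?_, h0, fun h => h⟩
      intro hdvd
      exact h ⟨by omega, h0, (PySem.Int.mod_eq_zero_iff_dvd rem p).2 hdvd⟩
  | succ n ih =>
    intro rem c hn hp h0
    by_cases h : 2 ≤ p.natAbs ∧ rem ≠ 0 ∧ PySem.Int.mod rem p = 0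
    · have hlt := pvDivShrink p rem h.1 h.2.1 h.2.2
      have hq : PySem.Int.floordiv rem p * p + PySem.Int.mod rem p = rem := PySem.Int.floordiv_mul_add_mod rem p
      rw [h.2.2, add_zero] at hq
      have hm0 : PySem.Int.floordiv rem p ≠ 0 := by
        intro e; apply h.2.1; rw [← hq, e, zero_mul]
      rw [aDivOut_pos p rem c h]
      obtain ⟨d1, d2, d3, d4⟩ := ih (PySem.Int.floordiv rem p) (c+1) (by omega) hp hm0
      refine ⟨d1.trans ⟨p, hq.symm⟩, d2, d3, ?_⟩
      intro hr
      apply d4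
      nlinarith [hq]
    · rw [aDivOut_neg p rem c h]
      refine ⟨dvd_refl _, ?_, h0, fun h => h⟩
      intro hdvd
      exact h ⟨by omega, h0, (PySem.Int.mod_eq_zero_iff_dvd rem p).2 hdvd⟩

-- a no-divisor suffix leaves the threaded loop inert
theorem pv_loop_stuck (l : List Int) : ∀ (i : Nat) (rem : Int) (exps : List Int),
    (∀ q ∈ l, q = -1 ∨ ¬ (q ∣ rem)) → bLoop l i rem exps = (exps, rem) := by
  induction l with
  | nil => intro i rem exps _; rfl
  | cons p rest ih =>
    intro i rem exps h
    by_cases hp : p = -1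
    · simp only [bLoop, if_pos hp]
      exact ih (i+1) rem exps (fun q hq => h q (List.mem_cons_of_mem _ hq))
    · have hnd := (h p (List.mem_cons_self)).resolve_left hp
      have hng : ¬ (2 ≤ p.natAbs ∧ rem ≠ 0 ∧ PySem.Int.mod rem p = 0) := by
        intro hg
        exact hnd ((PySem.Int.mod_eq_zero_iff_dvd rem p).1 hg.2.2)
      simp only [bLoop, if_neg hp, bDivOut_neg p rem _ hng, pv_set_getD]
      exact ih (i+1) rem exps (fun q hq => h q (List.mem_cons_of_mem _ hq))

theorem pv_loop_zero (l : List Int) : ∀ (i : Nat) (exps : List Int),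
    bLoop l i 0 exps = (exps, 0) := by
  induction l with
  | nil => intro i exps; rfl
  | cons p rest ih =>
    intro i exps
    by_cases hp : p = -1
    · simp only [bLoop, if_pos hp]; exact ih (i+1) exps
    · have hng : ¬ (2 ≤ p.natAbs ∧ (0:Int) ≠ 0 ∧ PySem.Int.mod 0 p = 0) := by simp
      simp only [bLoop, if_neg hp, bDivOut_neg p 0 _ hng, pv_set_getD]
      exact ih (i+1) exps

theorem pv_not_dvd_one (q : Int) (h2 : 2 ≤ q) : ¬ (q ∣ (1:Int)) := by
  intro h
  have := Int.le_of_dvd one_pos h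
  omega

-- the threaded loop on the broken-off suffix, when the remainder occurs in it
theorem pv_tail_mem (l : List Int) : ∀ (i : Nat) (rem : Int) (exps : List Int) (j : Nat),
    (∀ q ∈ l, 2 ≤ q ∧ Nat.Prime q.toNat ∧ rem < q * q) →
    PySem.List.index? l rem = some j →
    bLoop l i rem exps = (exps.set (i + j) (exps.getD (i + j) 0 + 1), 1) := by
  induction l with
  | nil => intro i rem exps j _ hj; simp [PySem.List.index?_eq_idxOf?] at hj
  | cons p rest ih =>
    intro i rem exps j h hj
    by_cases hp : p = rem
    · subst hp
      rw [PySem.List.index?_cons_self p rest] at hj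
      injection hj with hj
      subst hj
      obtain ⟨h2, hprime, _⟩ := h p (List.mem_cons_self)
      have hg : 2 ≤ p.natAbs ∧ p ≠ 0 ∧ PySem.Int.mod p p = 0 := by
        refine ⟨by omega, by omega, (PySem.Int.mod_eq_zero_iff_dvd p p).2 (dvd_refl p)⟩
      have hq : PySem.Int.floordiv p p * p + PySem.Int.mod p p = p := PySem.Int.floordiv_mul_add_mod p p
      rw [hg.2.2, add_zero] at hq
      have hf1 : PySem.Int.floordiv p p = 1 := by
        have hp0 : p ≠ 0 := by omega
        exact mul_right_cancel₀ hp0 (by rw [hq, one_mul] : PySem.Int.floordiv p p * p = 1 * p)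
      have hng : ¬ (2 ≤ p.natAbs ∧ (1:Int) ≠ 0 ∧ PySem.Int.mod 1 p = 0) := by
        intro hg'
        exact pv_not_dvd_one p h2 ((PySem.Int.mod_eq_zero_iff_dvd 1 p).1 hg'.2.2)
      have hdiv : bDivOut p p (exps.getD i 0) = (1, exps.getD i 0 + 1) := by
        rw [bDivOut_pos p p _ hg, hf1, bDivOut_neg p 1 _ hng]
      have hne1 : ¬ p = -1 := by omega
      simp only [bLoop, if_neg hne1, hdiv]
      rw [pv_loop_stuck rest (i+1) 1 _ ?side]
      · simp
      case side =>
        intro q hq'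
        obtain ⟨hq2, _, _⟩ := h q (List.mem_cons_of_mem _ hq')
        exact Or.inr (pv_not_dvd_one q hq2)
    · rw [PySem.List.index?_cons_of_ne rest hp] at hj
      obtain ⟨j', hj', rfl⟩ : ∃ j', PySem.List.index? rest rem = some j' ∧ j = j' + 1 := by
        cases hidx : PySem.List.index? rest rem with
        | none => rw [hidx] at hj; simp at hj
        | some k => rw [hidx] at hj; simp at hj; exact ⟨k, rfl, hj.symm⟩
      have hmem : rem ∈ rest := (PySem.List.index?_isSome_iff rest rem).1 (by rw [hj']; rfl)
      obtain ⟨hrem2, hremp, _⟩ := h rem (List.mem_cons_of_mem _ hmem)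
      obtain ⟨hp2, hpprime, _⟩ := h p (List.mem_cons_self)
      have hnd : ¬ (p ∣ rem) := by
        intro hd
        apply hp
        have hd' : p.natAbs ∣ rem.natAbs := Int.natAbs_dvd_natAbs.2 hd
        have hrt : rem.toNat = rem.natAbs := by omega
        rw [hrt] at hremp
        rcases (Nat.Prime.eq_one_or_self_of_dvd hremp p.natAbs hd') with h1 | hs
        · omega
        · omega
      have hng : ¬ (2 ≤ p.natAbs ∧ rem ≠ 0 ∧ PySem.Int.mod rem p = 0) := by
        intro hg
        exact hnd ((PySem.Int.mod_eq_zero_iff_dvd rem p).1 hg.2.2)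
      have hne1 : ¬ p = -1 := by omega
      simp only [bLoop, if_neg hne1, bDivOut_neg p rem _ hng, pv_set_getD]
      rw [ih (i+1) rem exps j' (fun q hq' => h q (List.mem_cons_of_mem _ hq')) hj']
      have harith : i + 1 + j' = i + (j' + 1) := by omega
      rw [harith]

-- the threaded loop on the broken-off suffix, when the remainder does not occur in it
theorem pv_tail_nomem (l : List Int) : ∀ (i : Nat) (rem : Int) (exps : List Int),
    2 ≤ rem → (∀ q ∈ l, 2 ≤ q ∧ rem < q * q) → l.Pairwise (· ≤ ·) → rem ∉ l →
    (bLoop l i rem exps).2 ≠ 1 := by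
  induction l with
  | nil => intro i rem exps h2 _ _ _; simp [bLoop]; omega
  | cons p rest ih =>
    intro i rem exps h2 h hsort hnm
    obtain ⟨hp2, hplt⟩ := h p (List.mem_cons_self)
    have hpne : p ≠ rem := fun e => hnm (e ▸ List.mem_cons_self)
    have hnrest : rem ∉ rest := fun e => hnm (List.mem_cons_of_mem _ e)
    have hne1 : ¬ p = -1 := by omega
    rw [List.pairwise_cons] at hsort
    by_cases hd : p ∣ rem
    · have hg : 2 ≤ p.natAbs ∧ rem ≠ 0 ∧ PySem.Int.mod rem p = 0 := by
        refine ⟨by omega, by omega, (PySem.Int.mod_eq_zero_iff_dvd rem p).2 hd⟩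
      have hq : PySem.Int.floordiv rem p * p + PySem.Int.mod rem p = rem := PySem.Int.floordiv_mul_add_mod rem p
      rw [hg.2.2, add_zero] at hq
      set m := PySem.Int.floordiv rem p with hm
      have hmpos : 0 < m := by nlinarith [hq]
      have hmlt : m < p := by nlinarith [hq]
      have hmne1 : m ≠ 1 := by
        intro e; rw [e, one_mul] at hq; exact hpne hq
      have hngm : ¬ (2 ≤ p.natAbs ∧ m ≠ 0 ∧ PySem.Int.mod m p = 0) := by
        intro hg'
        have hdm := (PySem.Int.mod_eq_zero_iff_dvd m p).1 hg'.2.2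
        have := Int.le_of_dvd hmpos hdm
        omega
      have hdiv : bDivOut p rem (exps.getD i 0) = (m, exps.getD i 0 + 1) := by
        rw [bDivOut_pos p rem _ hg, ← hm, bDivOut_neg p m _ hngm]
      simp only [bLoop, if_neg hne1, hdiv]
      rw [pv_loop_stuck rest (i+1) m _ ?stuck]
      · simp
        omega
      case stuck =>
        intro q hq'
        obtain ⟨hq2, _⟩ := h q (List.mem_cons_of_mem _ hq')
        refine Or.inr ?_
        intro hdq
        have h1 := Int.le_of_dvd hmpos hdq
        have h3 := hsort.1 q hq'
        omega
    · have hng : ¬ (2 ≤ p.natAbs ∧ rem ≠ 0 ∧ PySem.Int.mod rem p = 0) := by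
        intro hg
        exact hd ((PySem.Int.mod_eq_zero_iff_dvd rem p).1 hg.2.2)
      simp only [bLoop, if_neg hne1, bDivOut_neg p rem _ hng, pv_set_getD]
      exact ih (i+1) rem exps h2 (fun q hq' => h q (List.mem_cons_of_mem _ hq')) hsort.2 hnrest

theorem pv_index_append (l : List Int) (v : Int) : ∀ (pre : List Int), v ∉ pre →
    PySem.List.index? (pre ++ l) v = (PySem.List.index? l v).map (· + pre.length) := by
  intro pre
  induction pre with
  | nil =>
    intro _
    rw [List.nil_append]
    cases h : PySem.List.index? l v <;> simp
  | cons a pre' ih =>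
    intro hnm
    have ha : a ≠ v := fun e => hnm (e ▸ List.mem_cons_self)
    have h' : v ∉ pre' := fun e => hnm (List.mem_cons_of_mem _ e)
    rw [List.cons_append, PySem.List.index?_cons_of_ne (pre' ++ l) ha, ih h']
    cases h : PySem.List.index? l v with
    | none => simp
    | some k => simp; omega

-- when no base element (other than -1) divides the remainder, A's loop is inert too
theorem pv_aLoop_inert (l : List Int) : ∀ (i : Nat) (rem : Int) (exps : List Int),
    (∀ p ∈ l, p = -1 ∨ ¬ (p ∣ rem)) → aLoop l i rem exps = (exps, rem) := by
  induction l with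
  | nil => intro i rem exps _; rfl
  | cons p rest ih =>
    intro i rem exps h
    by_cases hp : p = -1
    · simp only [aLoop, if_pos hp]
      exact ih (i+1) rem exps (fun q hq => h q (List.mem_cons_of_mem _ hq))
    · have hnd := (h p (List.mem_cons_self)).resolve_left hp
      by_cases hbrk : rem < p * p
      · simp only [aLoop, if_neg hp, if_pos hbrk]
      · have hmod : PySem.Int.mod rem p ≠ 0 := fun e =>
          hnd ((PySem.Int.mod_eq_zero_iff_dvd rem p).1 e)
        simp only [aLoop, if_neg hp, if_neg hbrk, if_pos hmod]
        exact ih (i+1) rem exps (fun q hq => h q (List.mem_cons_of_mem _ hq))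

theorem pv_aLoop_zero (l : List Int) : ∀ (i : Nat) (exps : List Int),
    (∀ p ∈ l, p ≠ 0) → aLoop l i 0 exps = (exps, 0) := by
  induction l with
  | nil => intro i exps _; rfl
  | cons p rest ih =>
    intro i exps h
    by_cases hp : p = -1
    · simp only [aLoop, if_pos hp]
      exact ih (i+1) exps (fun q hq => h q (List.mem_cons_of_mem _ hq))
    · have hbrk : (0:Int) < p * p := mul_self_pos.mpr (h p List.mem_cons_self)
      simp only [aLoop, if_neg hp, if_pos hbrk]

theorem pv_main (l : List Int) : ∀ (pre : List Int) (rem : Int) (exps : List Int),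
    0 ≤ rem →
    (∀ p ∈ l, p = -1 ∨ (2 ≤ p ∧ Nat.Prime p.toNat)) →
    (pre ++ l).Pairwise (· ≤ ·) →
    (∀ q ∈ pre, q = -1 ∨ (2 ≤ q ∧ ¬ (q ∣ rem))) →
    (∀ j, pre.length ≤ j → exps.getD j 0 = 0) →
    aFinish (pre ++ l) (aLoop l pre.length rem exps) =
      (if (bLoop l pre.length rem exps).2 = 1 then some (bLoop l pre.length rem exps).1 else none) := by
  induction l with
  | nil =>
    intro pre rem exps hr hP hsort hpre hexps
    simp only [aLoop, bLoop, List.append_nil]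
    by_cases h1 : rem = 1
    · simp [aFinish, h1]
    · have hnm : rem ∉ pre := by
        intro hm
        rcases hpre rem hm with he | ⟨h2, hnd⟩
        · omega
        · exact hnd (dvd_refl rem)
      rw [if_neg h1]
      unfold aFinish
      rw [if_neg h1, (PySem.List.index?_eq_none_iff pre rem).2 hnm]
  | cons p rest ih =>
    intro pre rem exps hr hP hsort hpre hexps
    have hstep : pre ++ p :: rest = (pre ++ [p]) ++ rest := by simp
    have hlen : (pre ++ [p]).length = pre.length + 1 := by simp
    by_cases hp1 : p = -1
    · simp only [aLoop, bLoop, if_pos hp1]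
      have hsort' : ((pre ++ [p]) ++ rest).Pairwise (· ≤ ·) := by rw [← hstep]; exact hsort
      have := ih (pre ++ [p]) rem exps hr
        (fun q hq => hP q (List.mem_cons_of_mem _ hq)) hsort'
        (fun q hq => by
          rcases List.mem_append.1 hq with h' | h'
          · exact hpre q h'
          · simp at h'; exact Or.inl (h' ▸ hp1))
        (fun j hj => hexps j (by omega))
      rw [hlen] at this
      rw [hstep]
      exact this
    · obtain ⟨hp2, hpprime⟩ := (hP p List.mem_cons_self).resolve_left hp1
      have hp4 : (4:Int) ≤ p * p := by nlinarith
      have hlrest : (p :: rest).Pairwise (· ≤ ·) := (List.pairwise_append.1 hsort).2.1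
      have hple : ∀ q ∈ rest, p ≤ q := (List.pairwise_cons.1 hlrest).1
      by_cases hbrk : rem < p * p
      · -- A breaks here
        simp only [aLoop, if_neg hp1, if_pos hbrk]
        by_cases h1 : rem = 1
        · subst h1
          rw [pv_loop_stuck (p :: rest) pre.length 1 exps (fun q hq => by
            rcases hP q hq with he | ⟨h2, _⟩
            · exact Or.inl he
            · exact Or.inr (pv_not_dvd_one q h2))]
          simp [aFinish]
        · by_cases h0 : rem = 0
          · subst h0
            rw [pv_loop_zero (p :: rest) pre.length exps]
            have hnm : (0:Int) ∉ pre ++ p :: rest := by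
              intro hm
              rcases List.mem_append.1 hm with h' | h'
              · rcases hpre 0 h' with he | ⟨h2, _⟩ <;> omega
              · rcases hP 0 h' with he | ⟨h2, _⟩ <;> omega
            unfold aFinish
            simp only [if_neg h1]
            rw [(PySem.List.index?_eq_none_iff _ _).2 hnm]
          · have h2r : (2:Int) ≤ rem := by omega
            have htl : ∀ q ∈ p :: rest, 2 ≤ q ∧ Nat.Prime q.toNat ∧ rem < q * q := by
              intro q hq
              rcases List.mem_cons.1 hq with rfl | hq'
              · exact ⟨hp2, hpprime, hbrk⟩
              · have hpq := hple q hq'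
                rcases hP q (List.mem_cons_of_mem _ hq') with he | ⟨hq2, hqprime⟩
                · omega
                · exact ⟨hq2, hqprime, by nlinarith⟩
            have hnmpre : rem ∉ pre := by
              intro hm
              rcases hpre rem hm with he | ⟨_, hnd⟩
              · omega
              · exact hnd (dvd_refl rem)
            cases hidx : PySem.List.index? (p :: rest) rem with
            | some j =>
              rw [pv_tail_mem (p :: rest) pre.length rem exps j htl hidx]
              unfold aFinish
              simp only [if_neg h1]
              rw [pv_index_append (p :: rest) rem pre hnmpre, hidx]
              simp [Nat.add_comm]
            | none =>
              have hnm : rem ∉ p :: rest := (PySem.List.index?_eq_none_iff _ _).1 hidx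
              rw [if_neg (pv_tail_nomem (p :: rest) pre.length rem exps h2r
                (fun q hq => ⟨(htl q hq).1, (htl q hq).2.2⟩) hlrest hnm)]
              unfold aFinish
              simp only [if_neg h1]
              rw [pv_index_append (p :: rest) rem pre (fun hm => hnmpre hm), hidx]
              rfl
      · -- no break: p*p ≤ rem, hence rem ≥ 4
        have h0 : rem ≠ 0 := by omega
        have hsort' : ((pre ++ [p]) ++ rest).Pairwise (· ≤ ·) := by rw [← hstep]; exact hsort
        by_cases hdv : p ∣ rem
        · have hmod : PySem.Int.mod rem p = 0 := (PySem.Int.mod_eq_zero_iff_dvd rem p).2 hdv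
          have hmodnn : ¬ (PySem.Int.mod rem p ≠ 0) := fun hc => hc hmod
          obtain ⟨d1, d2, d3, d4⟩ := pv_divOut_spec p rem.natAbs rem 0 le_rfl hp2 h0
          have hz : exps.getD pre.length 0 = 0 := hexps pre.length le_rfl
          have hbeq : bDivOut p rem (exps.getD pre.length 0) =
              ((aDivOut p rem 0).1, (aDivOut p rem 0).2) := by
            rw [pv_divOut_eq p rem.natAbs rem _ le_rfl,
              pv_divOut_shift p rem.natAbs rem _ le_rfl, hz, zero_add]
          simp only [aLoop, bLoop, if_neg hp1, if_neg hbrk, if_neg hmodnn, hbeq]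
          have := ih (pre ++ [p]) (aDivOut p rem 0).1 (exps.set pre.length (aDivOut p rem 0).2)
            (d4 hr)
            (fun q hq => hP q (List.mem_cons_of_mem _ hq)) hsort'
            (fun q hq => by
              rcases List.mem_append.1 hq with h' | h'
              · rcases hpre q h' with he | ⟨hq2, hnd⟩
                · exact Or.inl he
                · exact Or.inr ⟨hq2, fun hc => hnd (hc.trans d1)⟩
              · simp at h'
                subst h'
                exact Or.inr ⟨hp2, d2⟩)
            (fun j hj => by
              rw [pv_getD_set_ne exps _ pre.length j (by omega)]
              exact hexps j (by omega))
          rw [hlen] at this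
          rw [hstep]
          exact this
        · have hmodne : PySem.Int.mod rem p ≠ 0 := fun e =>
            hdv ((PySem.Int.mod_eq_zero_iff_dvd rem p).1 e)
          have hng : ¬ (2 ≤ p.natAbs ∧ rem ≠ 0 ∧ PySem.Int.mod rem p = 0) := fun hg => hmodne hg.2.2
          simp only [aLoop, bLoop, if_neg hp1, if_neg hbrk, if_pos hmodne,
            bDivOut_neg p rem _ hng, pv_set_getD]
          have := ih (pre ++ [p]) rem exps hr
            (fun q hq => hP q (List.mem_cons_of_mem _ hq)) hsort'
            (fun q hq => by
              rcases List.mem_append.1 hq with h' | h'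
              · exact hpre q h'
              · simp at h'
                subst h'
                exact Or.inr ⟨hp2, hdv⟩)
            (fun j hj => hexps j (by omega))
          rw [hlen] at this
          rw [hstep]
          exact this

-- bridge: the threaded loop computes exactly B's functional pass, written over the
-- untouched prefix
theorem pv_bridge (l : List Int) : ∀ (i : Nat) (rem : Int) (exps : List Int),
    exps.length = i + l.length → (∀ j, i ≤ j → exps.getD j 0 = 0) →
    bLoop l i rem exps = (exps.take i ++ (bRun l rem).1, (bRun l rem).2) := by
  induction l with
  | nil =>
    intro i rem exps hlen _
    simp only [bLoop, bRun]
    simp only [List.length_nil] at hlen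
    rw [List.take_of_length_le (by omega)]
    simp
  | cons p rest ih =>
    intro i rem exps hlen hz
    have hi : i < exps.length := by simp at hlen; omega
    have hgi : exps[i]? = some 0 := by
      have h0 := hz i le_rfl
      rw [List.getD_eq_getElem?_getD, List.getElem?_eq_getElem hi] at h0
      simp at h0
      rw [List.getElem?_eq_getElem hi, h0]
    by_cases hp : p = -1
    · simp only [bLoop, bRun, if_pos hp]
      rw [ih (i+1) rem exps (by simp at hlen ⊢; omega) (fun j hj => hz j (by omega))]
      rw [List.take_succ, hgi]
      simp
    · have hz0 : exps.getD i 0 = 0 := hz i le_rfl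
      simp only [bLoop, bRun, if_neg hp, hz0]
      rw [pv_strip_eq p rem.natAbs rem 0 le_rfl]
      set rc := bDivOut p rem 0 with hrc
      rw [ih (i+1) rc.1 (exps.set i rc.2)
        (by simp at hlen ⊢; omega)
        (fun j hj => by rw [pv_getD_set_ne exps _ i j (by omega)]; exact hz j (by omega))]
      have htake : (exps.set i rc.2).take (i+1) = exps.take i ++ [rc.2] := by
        rw [List.take_succ, List.take_set_of_le (Nat.le_refl i)]
        have : (exps.set i rc.2)[i]? = some rc.2 :=
          List.getElem?_set_self (by simpa using hi)
        rw [this]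
        simp
      rw [htake]
      simp

-- B's result written in terms of the threaded loop (for a base that is nonempty when
-- value is negative)
theorem pv_alt_eq (value : Int) (base : List Int) (hnil : value < 0 → base ≠ []) :
    factor_over_base_py_alt value base =
      (let exps0 := List.replicate base.length (0 : Int)
       let start := if value < 0 then (exps0.set 0 1, -value) else (exps0, value)
       if (bLoop base 0 start.2 start.1).2 = 1 then some (bLoop base 0 start.2 start.1).1
       else none) := by
  by_cases hv : value < 0
  · obtain ⟨h, tl, rfl⟩ : ∃ h tl, base = h :: tl := by
      cases base with
      | nil => exact absurd rfl (hnil hv)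
      | cons a t => exact ⟨a, t, rfl⟩
    have habs : |value| = -value := abs_of_neg hv
    simp only [factor_over_base_py_alt, habs, if_pos hv]
    have hzrepl : ∀ j, 1 ≤ j →
        ((List.replicate (h :: tl).length (0:Int)).set 0 1).getD j 0 = 0 := by
      intro j hj
      rw [pv_getD_set_ne _ _ 0 j (by omega)]
      exact pv_getD_replicate _ _
    by_cases hp : h = -1
    · simp only [bLoop, bRun, if_pos hp]
      rw [pv_bridge tl 1 (-value) _ (by simp; omega) hzrepl]
      have htake1 : (((List.replicate (h :: tl).length (0:Int)).set 0 1)).take 1 = [1] := by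
        simp [List.replicate_succ]
      rw [htake1]
      by_cases h1 : (bRun tl (-value)).2 = 1
      · simp [h1]
      · simp [h1]
    · simp only [bLoop, bRun, if_neg hp]
      have hg1 : ((List.replicate (h :: tl).length (0:Int)).set 0 1).getD 0 0 = 1 := by
        simp [List.replicate_succ]
      rw [hg1, pv_strip_eq h (-value).natAbs (-value) 0 le_rfl,
        pv_divOut_eq h (-value).natAbs (-value) 1 le_rfl,
        pv_divOut_shift h (-value).natAbs (-value) 1 le_rfl,
        ← pv_divOut_eq h (-value).natAbs (-value) 0 le_rfl]
      set rc := bDivOut h (-value) 0 with hrc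
      have hset2 : (((List.replicate (h :: tl).length (0:Int)).set 0 1).set 0 (1 + rc.2)) =
          (List.replicate (h :: tl).length (0:Int)).set 0 (1 + rc.2) := List.set_set _
      rw [hset2, pv_bridge tl 1 rc.1 _ (by simp; omega)
        (fun j hj => by
          rw [pv_getD_set_ne _ _ 0 j (by omega)]
          exact pv_getD_replicate _ _)]
      have htake1 : ((List.replicate (h :: tl).length (0:Int)).set 0 (1 + rc.2)).take 1 =
          [1 + rc.2] := by
        simp [List.replicate_succ]
      rw [htake1]
      by_cases h1 : (bRun tl rc.1).2 = 1
      · simp [h1]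
        omega
      · simp [h1]
  · have habs : |value| = value := abs_of_nonneg (by omega)
    simp only [factor_over_base_py_alt, habs, if_neg hv]
    rw [pv_bridge base 0 value (List.replicate base.length 0) (by simp)
      (fun j _ => pv_getD_replicate _ _)]
    simp

-- ===== VERDICT (by name: the statement is the Claim_ definition above) =====
theorem factor_over_base_py_spec : Claim_equal_factor_over_base_py := by
  intro value base hdom hpre
  unfold Spec_factor_over_base_py
  have hnil : value < 0 → base ≠ [] := by
    intro hv
    rcases hpre with ⟨_, _, hneg⟩ | ⟨_, hn, _⟩ | ⟨hv0, _⟩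
    · intro he; subst he; simp at hneg; omega
    · exact hn hv
    · omega
  rw [pv_alt_eq value base hnil]
  rcases hpre with ⟨hsort, hP, hneg⟩ | ⟨hv0, hn, hnd⟩ | ⟨hv0, hnm⟩
  case inr.inl =>
    -- inert case: nothing in the base divides value, both loops do nothing
    have key : ∀ (rem : Int) (exps : List Int), 0 ≤ rem → (rem ∣ value) →
        (∀ p ∈ base, p = -1 ∨ ¬ (p ∣ rem)) →
        aFinish base (aLoop base 0 rem exps) =
          (if (bLoop base 0 rem exps).2 = 1 then some (bLoop base 0 rem exps).1 else none) := by
      intro rem exps hr hdv hin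
      rw [pv_aLoop_inert base 0 rem exps hin, pv_loop_stuck base 0 rem exps hin]
      by_cases h1 : rem = 1
      · simp [aFinish, h1]
      · have hnmem : rem ∉ base := by
          intro hm
          rcases hin rem hm with he | hnr
          · omega
          · exact hnr (dvd_refl rem)
        unfold aFinish
        rw [if_neg h1, if_neg h1, (PySem.List.index?_eq_none_iff base rem).2 hnmem]
    by_cases hv : value < 0
    · simp only [factor_over_base_py, if_pos hv]
      exact key (-value) _ (by omega) (dvd_neg.1 (dvd_refl (-value)))
        (fun p hp => (hnd p hp).imp id (fun h2 hc => h2.2 ((dvd_neg.1 hc))))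
    · simp only [factor_over_base_py, if_neg hv]
      exact key value _ (by omega) (dvd_refl value)
        (fun p hp => (hnd p hp).imp id (fun h2 hc => h2.2 hc))
  case inr.inr =>
    subst hv0
    have hv : ¬ ((0:Int) < 0) := by omega
    simp only [factor_over_base_py, if_neg hv]
    rw [pv_aLoop_zero base 0 _ (fun p hp => fun e => hnm (e ▸ hp)),
      pv_loop_zero base 0 _]
    unfold aFinish
    rw [if_neg (by omega : ¬ (0:Int) = 1), if_neg (by omega : ¬ (0:Int) = 1),
      (PySem.List.index?_eq_none_iff base 0).2 hnm]
  case inl =>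
  by_cases hv : value < 0
  · obtain ⟨tl, rfl⟩ : ∃ tl, base = -1 :: tl := by
      have hh := hneg hv
      cases base with
      | nil => simp at hh
      | cons a t =>
        simp at hh
        exact ⟨t, by rw [hh]⟩
    simp only [factor_over_base_py, if_pos hv]
    simp only [aLoop, bLoop]
    have := pv_main tl [-1] (-value) ((List.replicate ((-1) :: tl).length (0 : Int)).set 0 1)
      (by omega)
      (fun q hq => hP q (List.mem_cons_of_mem _ hq))
      (by simpa using hsort)
      (fun q hq => by simp at hq; exact Or.inl hq)
      (fun j hj => by
        rw [pv_getD_set_ne _ _ 0 j (by simp at hj; omega)]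
        exact pv_getD_replicate _ _)
    simpa using this
  · have hv' : 0 ≤ value := by omega
    simp only [factor_over_base_py, if_neg hv]
    have := pv_main base [] value (List.replicate base.length (0 : Int))
      hv' hP (by simpa using hsort) (by simp)
      (fun j _ => pv_getD_replicate _ _)
    simpa using this
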